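-- pv_equiv track=rewrite | github.com/taylor1355/personal-assistant | agent/src/personal_assistant_agent/agents/journal_agent.py | _strike_through
-- ===== SOURCE A (Python) =====
-- def _strike_through(todos_text: str, todo_line: str) -> str:
--     """Replace ``- <todo_line>`` with ``- ~~<todo_line>~~ done`` in-place.
--
--     Only the first occurrence is replaced; if the line appears multiple
--     times the caller should emit multiple detections with distinguishing
--     evidence.
--     """
--     target_line = todo_line.strip()
--     replacement_seen = False
--     out: list[str] = []
--     for line in todos_text.splitlines(keepends=True):
--         stripped = line.rstrip("\r\n")
--         if not replacement_seen and stripped.lstrip().startswith("- "):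
--             body = stripped.lstrip()[2:]
--             if body.strip() == target_line:
--                 indent = stripped[: len(stripped) - len(stripped.lstrip())]
--                 newline = line[len(stripped):]
--                 out.append(f"{indent}- ~~{body}~~ done{newline}")
--                 replacement_seen = True
--                 continue
--         out.append(line)
--     return "".join(out)
-- ===== SOURCE B (Python) =====
-- def _strike_through(todos_text: str, todo_line: str) -> str:
--     """Index-then-splice: find the first matching todo line, then rebuild
--     the text from the three pieces (before / transformed line / after)."""
--     target_line = todo_line.strip()
--
--     def matches(line: str) -> bool:
--         body = line.rstrip("\r\n").lstrip()
--         return body.startswith("- ") and body[2:].strip() == target_line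
--
--     lines = todos_text.splitlines(keepends=True)
--     i = next((j for j, l in enumerate(lines) if matches(l)), None)
--     if i is None:
--         return todos_text
--     line = lines[i]
--     stripped = line.rstrip("\r\n")
--     ls = stripped.lstrip()
--     body = ls[2:]
--     indent = stripped[: len(stripped) - len(ls)]
--     newline = line[len(stripped):]
--     return "".join(lines[:i]) + f"{indent}- ~~{body}~~ done{newline}" + "".join(lines[i + 1:])
-- ===== Notes on version B (the rewrite author's own statement) =====
-- stated objective: alternative
-- what changed: Replaces the single accumulator pass with a seen-flag by an index-then-splice decomposition: find the index of the first matching line, return the text unchanged if none, otherwise rebuild from before / transformed line / after.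
import Mathlib
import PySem

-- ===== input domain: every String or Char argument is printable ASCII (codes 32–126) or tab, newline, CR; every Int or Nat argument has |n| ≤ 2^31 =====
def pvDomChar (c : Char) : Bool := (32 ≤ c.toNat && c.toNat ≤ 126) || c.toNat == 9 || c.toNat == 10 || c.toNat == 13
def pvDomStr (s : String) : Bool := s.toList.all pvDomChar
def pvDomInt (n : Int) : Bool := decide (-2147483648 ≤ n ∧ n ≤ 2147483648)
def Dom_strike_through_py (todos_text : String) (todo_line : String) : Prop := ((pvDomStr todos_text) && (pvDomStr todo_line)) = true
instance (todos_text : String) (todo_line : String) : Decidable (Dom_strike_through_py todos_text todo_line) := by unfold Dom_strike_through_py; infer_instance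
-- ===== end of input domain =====

-- B restates A as index-then-splice: find the first matching line, rebuild the text
-- from the three pieces, instead of a single accumulator pass with a seen-flag.
-- Equivalence is proved on all inputs (no Pre_); A is total here.

-- shared helper: s.splitlines(keepends=True), hand-ported (exact on the Dom alphabet,
-- where the only line breaks are '\n', '\r' and '\r\n')
def splitlinesKeep (acc : List Char) : List Char → List (List Char)
  | [] => if acc.isEmpty then [] else [acc.reverse]
  | c :: rest =>
    if c == '\n' then (acc.reverse ++ ['\n']) :: splitlinesKeep [] rest
    else if c == '\r' then
      if rest.head? == some '\n' then (acc.reverse ++ ['\r', '\n']) :: splitlinesKeep [] rest.tail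
      else (acc.reverse ++ ['\r']) :: splitlinesKeep [] rest
    else splitlinesKeep (c :: acc) rest
termination_by cs => cs.length

-- shared helper: line.rstrip("\r\n"), hand-ported (exact: drop trailing '\r'/'\n')
def rstripRN (l : List Char) : List Char :=
  (l.reverse.dropWhile (fun c => c == '\r' || c == '\n')).reverse

-- ===== PORT A =====
-- loop body of A's for-loop: state = (replacement_seen, out)
def stepA (target : List Char) (st : Bool × List Char) (line : List Char) : Bool × List Char :=
  let stripped := rstripRN line
  if !st.1 && PySem.Chars.startswith (PySem.Chars.lstrip stripped) ['-', ' '] then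
    let body := PySem.List.slice (PySem.Chars.lstrip stripped) (some 2) none
    if PySem.Chars.strip body == target then
      let indent := PySem.List.slice stripped none (some ((stripped.length : Int) - (PySem.Chars.lstrip stripped).length))
      let newline := PySem.List.slice line (some (stripped.length : Int)) none
      (true, st.2 ++ (indent ++ ['-', ' ', '~', '~'] ++ body ++ ['~', '~', ' ', 'd', 'o', 'n', 'e'] ++ newline))
    else (st.1, st.2 ++ line)
  else (st.1, st.2 ++ line)

def strike_through_py (todos_text : String) (todo_line : String) : String :=
  let target := PySem.Chars.strip todo_line.toList
  String.ofList ((splitlinesKeep [] todos_text.toList).foldl (stepA target) (false, [])).2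

-- ===== PORT B =====
-- B's per-line matching helper
def matchLine (target : List Char) (line : List Char) : Bool :=
  let body := PySem.Chars.lstrip (rstripRN line)
  PySem.Chars.startswith body ['-', ' '] &&
    PySem.Chars.strip (PySem.List.slice body (some 2) none) == target

-- B's reconstruction of the struck-through line
def transformLine (line : List Char) : List Char :=
  let stripped := rstripRN line
  let ls := PySem.Chars.lstrip stripped
  let body := PySem.List.slice ls (some 2) none
  let indent := PySem.List.slice stripped none (some ((stripped.length : Int) - ls.length))
  let newline := PySem.List.slice line (some (stripped.length : Int)) none
  indent ++ ['-', ' ', '~', '~'] ++ body ++ ['~', '~', ' ', 'd', 'o', 'n', 'e'] ++ newline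

def strike_through_py_alt (todos_text : String) (todo_line : String) : String :=
  let target := PySem.Chars.strip todo_line.toList
  let lines := splitlinesKeep [] todos_text.toList
  match lines.findIdx? (matchLine target) with
  | none => todos_text
  | some i =>
      String.ofList ((lines.take i).flatten ++ transformLine (lines.getD i []) ++ (lines.drop (i + 1)).flatten)

-- ===== PRECONDITION & SPEC =====
def Spec_strike_through_py (todos_text : String) (todo_line : String) (out : String) : Prop := out = strike_through_py_alt todos_text todo_line
instance (todos_text : String) (todo_line : String) (out : String) : Decidable (Spec_strike_through_py todos_text todo_line out) := by unfold Spec_strike_through_py; infer_instance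

-- ===== CLAIM (what is proved, stated in full; the proofs are below) =====
def Claim_equal_strike_through_py : Prop := ∀ (todos_text : String) (todo_line : String), Dom_strike_through_py todos_text todo_line → Spec_strike_through_py todos_text todo_line (strike_through_py todos_text todo_line)

-- ===== LEMMAS AND PROOFS =====

-- splitlinesKeep partitions its input: flattening gives the text back
theorem flatten_splitlinesKeep (cs acc : List Char) :
    (splitlinesKeep acc cs).flatten = acc.reverse ++ cs := by
  induction acc, cs using splitlinesKeep.induct <;>
    simp_all [splitlinesKeep, List.isEmpty_iff]
  all_goals exact List.cons_head?_tail (by assumption)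

-- once the flag is set, A's loop just appends every remaining line
theorem foldl_stepA_true (target : List Char) (lines : List (List Char)) (out : List Char) :
    lines.foldl (stepA target) (true, out) = (true, out ++ lines.flatten) := by
  induction lines generalizing out with
  | nil => simp
  | cons l rest ih => simp [stepA, ih]

theorem stepA_matched (target line : List Char) (out : List Char)
    (h : matchLine target line = true) :
    stepA target (false, out) line = (true, out ++ transformLine line) := by
  simp only [matchLine, Bool.and_eq_true] at h
  simp [stepA, transformLine, h.1, h.2]

theorem stepA_unmatched (target line : List Char) (out : List Char)
    (h : matchLine target line = false) :
    stepA target (false, out) line = (false, out ++ line) := by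
  simp only [matchLine, Bool.and_eq_false_iff] at h
  rcases h with h | h <;> simp [stepA, h]

-- characterisation of A's whole loop by B's index-then-splice decomposition
theorem foldl_stepA_eq (target : List Char) (lines : List (List Char)) (out : List Char) :
    (lines.foldl (stepA target) (false, out)).2 =
      out ++ (match lines.findIdx? (matchLine target) with
        | none => lines.flatten
        | some i => (lines.take i).flatten ++ transformLine (lines.getD i []) ++ (lines.drop (i + 1)).flatten) := by
  induction lines generalizing out with
  | nil => simp
  | cons l rest ih =>
      by_cases h : matchLine target l = true
      · simp [List.findIdx?_cons, h, List.foldl_cons, stepA_matched target l out h, foldl_stepA_true]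
      · rw [Bool.not_eq_true] at h
        rw [List.foldl_cons, stepA_unmatched target l out h, ih]
        simp only [List.findIdx?_cons, h]
        cases hr : rest.findIdx? (matchLine target) with
        | none => simp
        | some i => simp [List.getD]

theorem strike_through_py_eq_alt (todos_text todo_line : String) :
    strike_through_py todos_text todo_line = strike_through_py_alt todos_text todo_line := by
  simp only [strike_through_py, strike_through_py_alt]
  rw [foldl_stepA_eq]
  cases h : (splitlinesKeep [] todos_text.toList).findIdx? (matchLine (PySem.Chars.strip todo_line.toList)) with
  | none => simp [flatten_splitlinesKeep]
  | some i => simp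

-- ===== VERDICT (by name: the statement is the Claim_ definition above) =====
theorem strike_through_py_spec : Claim_equal_strike_through_py := by
  intro todos_text todo_line _
  exact strike_through_py_eq_alt todos_text todo_line
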